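-- pv_equiv track=rewrite | github.com/guyue12346/Mathematical_modeling | Mathematical-Modeling_Knowledge-reserve/algorithm/Modern_Optimization-algorithms/Genetic-algorithm/Genetic_Test.py | replace_lowest_value_with_graph
-- ===== SOURCE A (Python) =====
-- def classify_nodes(graph_str):
--     class1 = []  # 存储分类为1的节点
--     class2 = []  # 存储分类为2的节点
--     edges = []   # 存储图的边关系
--
--     # 根据输入字符串构建节点分类和边关系
--     for i, char in enumerate(graph_str):
--         if char == '0':
--             class1.append(i + 1)  # 节点编号从1开始
--         else:
--             class2.append(i + 1)
--
--     # 定义图的连接关系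
--     graph = {
--         1: [2, 5, 7],
--         2: [3, 6,1],
--         3: [4, 7,5],
--         4: [5,3],
--         5: [1,4,3],
--         6: [7,2],
--         7: [1,3]
--     }
--
--     # 构建图的边关系
--     for node, neighbors in graph.items():
--         for neighbor in neighbors:
--             if node < neighbor:
--                 edges.append((node, neighbor))
--
--     # 寻找属于不同类别的节点之间的连接关系
--     connected_pairs = 0
--     for edge in edges:
--         if (edge[0] in class1 and edge[1] in class2) or (edge[0] in class2 and edge[1] in class1):
--             connected_pairs += 1
--
--     return connected_pairs
--
-- def replace_lowest_value_with_graph(input_string, graph_dict):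
--     # 初始化最低值和对应的键
--     lowest_value = float('inf')
--     lowest_key = None
--
--     # 遍历字典，计算各值并找到最低值的键
--     for key, value in graph_dict.items():
--         result = classify_nodes(value)
--         if result < lowest_value:
--             lowest_value = result
--             lowest_key = key
--
--     # 替换最低值的键对应的值为输入的01字符串
--     graph_dict[lowest_key] = input_string
--
--     return graph_dict
-- ===== SOURCE B (Python) =====
-- # B: score each string bit-parallel -- pack the 0/1 classification into a bitmask and
-- # sum popcounts of each node's neighbours in the opposite class (handshake/2), instead
-- # of building class lists and scanning edges; the minimal key is picked with builtin min.
-- # Like A, this mutates graph_dict in place (assigns to the chosen key).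
--
-- # _ADJ[u] = bitmask of the neighbours of node u (bit v-1 set) in the fixed graph.
-- _ADJ = (0, 82, 37, 90, 20, 13, 66, 37)
--
-- def _cut(s):
--     m = min(len(s), 7)          # nodes beyond the string belong to no class
--     present = (1 << m) - 1
--     ones = 0
--     for i in range(m):
--         if s[i] != '0':
--             ones |= 1 << i
--     zeros = present ^ ones
--     total = 0
--     for u in range(1, m + 1):
--         opp = ones if (ones >> (u - 1)) & 1 == 0 else zeros
--         total += bin(_ADJ[u] & present & opp).count('1')
--     return total // 2           # each cut edge was counted from both endpoints
--
-- def replace_lowest_value_with_graph(input_string, graph_dict):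
--     lowest_key = min(graph_dict, key=lambda k: _cut(graph_dict[k]), default=None)
--     graph_dict[lowest_key] = input_string
--     return graph_dict
-- ===== Notes on version B (the rewrite author's own statement) =====
-- stated objective: alternative
-- what changed: B scores a string bit-parallel: it packs the classification of the first min(len,7) characters into a bitmask and sums, per node, the popcount of its adjacency mask intersected with the opposite class (halving by the handshake lemma), instead of A's class1/class2 node lists, edge-list rebuild and per-edge membership scans; the minimal key is picked with builtin min (first minimum) instead of an explicit loop.
-- outside the precondition, e.g. on replace_lowest_value_with_graph('x', {}): A returns {None: 'x'}, B returns {None: 'x'}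
import Mathlib
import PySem

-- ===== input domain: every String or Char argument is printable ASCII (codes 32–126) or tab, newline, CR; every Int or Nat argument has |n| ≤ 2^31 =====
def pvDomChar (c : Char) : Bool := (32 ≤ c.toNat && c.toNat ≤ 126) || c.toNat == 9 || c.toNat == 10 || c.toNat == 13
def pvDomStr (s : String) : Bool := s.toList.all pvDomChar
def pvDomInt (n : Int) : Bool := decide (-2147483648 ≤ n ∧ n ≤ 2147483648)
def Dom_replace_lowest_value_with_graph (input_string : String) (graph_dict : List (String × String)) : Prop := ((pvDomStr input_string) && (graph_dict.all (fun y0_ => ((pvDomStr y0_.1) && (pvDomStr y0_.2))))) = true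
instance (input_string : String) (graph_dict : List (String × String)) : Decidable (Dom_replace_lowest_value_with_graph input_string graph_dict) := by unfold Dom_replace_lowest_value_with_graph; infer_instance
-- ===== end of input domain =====

-- ===== PORT A =====
-- B scores each string bit-parallel (adjacency bitmasks + popcount, handshake/2) and picks
-- the minimal key with builtin min, instead of A's class lists and per-edge membership scans
-- (objective: alternative). Both Pythons mutate graph_dict in place; the ports model the
-- returned dict.

-- loop body of classify_nodes' first loop: append node i+1 to class1 ('0') or class2
def clsStep (p : List Int × List Int) (ic : Int × Char) : List Int × List Int :=
  if ic.2 = '0' then (p.1 ++ [ic.1 + 1], p.2) else (p.1, p.2 ++ [ic.1 + 1])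

def classify_nodes (graph_str : String) : Int :=
  let cls := (PySem.List.enumerate graph_str.toList).foldl clsStep ([], [])
  let graph : List (Int × List Int) :=
    [(1, [2, 5, 7]), (2, [3, 6, 1]), (3, [4, 7, 5]), (4, [5, 3]),
     (5, [1, 4, 3]), (6, [7, 2]), (7, [1, 3])]
  let edges : List (Int × Int) :=
    graph.foldl (fun acc nv =>
      nv.2.foldl (fun a2 nb => if nv.1 < nb then a2 ++ [(nv.1, nb)] else a2) acc) []
  edges.foldl (fun cnt e =>
    if (e.1 ∈ cls.1 ∧ e.2 ∈ cls.2) ∨ (e.1 ∈ cls.2 ∧ e.2 ∈ cls.1) then cnt + 1 else cnt) 0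

def replace_lowest_value_with_graph (input_string : String) (graph_dict : List (String × String)) : List (String × String) :=
  -- float('inf') is modeled as `none` (greater than every result); under Pre_ the dict is
  -- nonempty, so lowest_key is `some k`; the `none` branch (Python assigns to the key None,
  -- which has no String representation) is excluded by Pre_.
  let st := graph_dict.foldl (fun (st : Option Int × Option String) kv =>
      let result := classify_nodes kv.2
      match st.1 with
      | none => (some result, some kv.1)
      | some lv => if result < lv then (some result, some kv.1) else st) (none, none)
  match st.2 with
  | some k => ((PySem.Dict.mk graph_dict).insert k input_string).items
  | none => graph_dict

-- ===== PORT B =====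
-- _ADJ[u] = bitmask of the neighbours of node u (bit v-1 set) in the fixed graph
def pvAdj : List Nat := [0, 82, 37, 90, 20, 13, 66, 37]

-- bin(x).count('1') on a nonnegative int = number of set bits (exact; structural
-- recursion on a fuel bound n ≥ number of binary digits of n, so the kernel can reduce it)
def popcountAux : Nat → Nat → Nat
  | 0, _ => 0
  | fuel + 1, n => if n = 0 then 0 else n % 2 + popcountAux fuel (n / 2)

def popcount (n : Nat) : Nat := popcountAux n n

def pvCutB (s : String) : Int :=
  let cs := s.toList
  let m := min cs.length 7
  let present := (1 <<< m) - 1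
  let ones := (List.range m).foldl
    (fun acc i => if cs.getD i ' ' != '0' then acc ||| (1 <<< i) else acc) 0
  let zeros := present ^^^ ones
  let total := (List.range' 1 m).foldl (fun acc u =>
      let opp := if (ones >>> (u - 1)) &&& 1 == 0 then ones else zeros
      acc + popcount ((pvAdj.getD u 0) &&& present &&& opp)) 0
  -- total // 2 on a nonnegative int is Nat division (exact)
  ((total / 2 : Nat) : Int)

def replace_lowest_value_with_graph_alt (input_string : String) (graph_dict : List (String × String)) : List (String × String) :=
  let d := PySem.Dict.mk graph_dict
  -- min(graph_dict, key=..., default=None): `none` = Python's None key (empty dict),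
  -- excluded by Pre_; graph_dict[k] inside the key lambda is get? (always hits under Pre_)
  let lowest_key := PySem.List.min? d.keys (fun k => pvCutB ((d.get? k).getD ""))
  match lowest_key with
  | some k => (d.insert k input_string).items
  | none => graph_dict

-- ===== PRECONDITION & SPEC =====
-- Pre_ excludes (a) the empty dict, on which Python A returns a dict keyed by None — not a
-- value of the declared String-keyed type — and (b) association lists with duplicate keys,
-- which do not represent any Python dict input.
def Pre_replace_lowest_value_with_graph (input_string : String) (graph_dict : List (String × String)) : Prop :=
  graph_dict ≠ [] ∧ (graph_dict.map Prod.fst).Nodup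
instance (input_string : String) (graph_dict : List (String × String)) : Decidable (Pre_replace_lowest_value_with_graph input_string graph_dict) := by unfold Pre_replace_lowest_value_with_graph; infer_instance

def pvWitness_replace_lowest_value_with_graph : String × (List (String × String)) :=
  ("0110100", [("g1", "0101011"), ("g2", "1111111")])

def Spec_replace_lowest_value_with_graph (input_string : String) (graph_dict : List (String × String)) (out : List (String × String)) : Prop := out = replace_lowest_value_with_graph_alt input_string graph_dict
instance (input_string : String) (graph_dict : List (String × String)) (out : List (String × String)) : Decidable (Spec_replace_lowest_value_with_graph input_string graph_dict out) := by unfold Spec_replace_lowest_value_with_graph; infer_instance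

-- ===== CLAIM (what is proved, stated in full; the proofs are below) =====
def Claim_equal_replace_lowest_value_with_graph : Prop := ∀ (input_string : String) (graph_dict : List (String × String)), Dom_replace_lowest_value_with_graph input_string graph_dict → Pre_replace_lowest_value_with_graph input_string graph_dict → Spec_replace_lowest_value_with_graph input_string graph_dict (replace_lowest_value_with_graph input_string graph_dict)

-- ===== LEMMAS AND PROOFS =====

-- the undirected edge list A's loops build (proof-only)
def pvEdges : List (Int × Int) :=
  [(1, 2), (1, 5), (1, 7), (2, 3), (2, 6), (3, 4), (3, 7), (3, 5), (4, 5), (6, 7)]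

-- A's per-string score written as an explicit sum over pvEdges (proof-only)
def aCut (s : String) : Int :=
  let cs := s.toList
  let n : Int := cs.length
  (pvEdges.map (fun e =>
     if e.1 ≤ n ∧ e.2 ≤ n ∧
        ((cs.getD (e.1 - 1).toNat ' ' == '0') ≠ (cs.getD (e.2 - 1).toNat ' ' == '0'))
     then (1 : Int) else 0)).sum

-- membership in the two class lists built by folding clsStep
theorem mem_clsFold (l : List (Int × Char)) (acc : List Int × List Int) (u : Int) :
    (u ∈ (l.foldl clsStep acc).1 ↔ u ∈ acc.1 ∨ ∃ p ∈ l, p.2 = '0' ∧ u = p.1 + 1) ∧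
    (u ∈ (l.foldl clsStep acc).2 ↔ u ∈ acc.2 ∨ ∃ p ∈ l, ¬p.2 = '0' ∧ u = p.1 + 1) := by
  induction l generalizing acc with
  | nil => simp
  | cons hd t ih =>
    simp only [List.foldl_cons, clsStep]
    by_cases hc : hd.2 = '0' <;>
      simp only [hc, if_true, if_false, ih, List.mem_append, List.mem_cons] <;>
      constructor <;> constructor <;> intro hx <;> aesop

theorem mem_class1 (cs : List Char) (u : Int) (hu : 1 ≤ u) :
    u ∈ ((PySem.List.enumerate cs).foldl clsStep ([], [])).1 ↔
      (u ≤ (cs.length : Int) ∧ cs.getD (u - 1).toNat ' ' = '0') := by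
  rw [(mem_clsFold (PySem.List.enumerate cs) ([], []) u).1]
  simp only [List.not_mem_nil, false_or]
  constructor
  · rintro ⟨p, hp, h0, hup⟩
    rw [PySem.List.mem_enumerate_iff] at hp
    obtain ⟨k, hk, rfl⟩ := hp
    simp only [zero_add] at hup h0 ⊢
    refine ⟨by omega, ?_⟩
    have hidx : (u - 1).toNat = k := by omega
    rw [hidx, List.getD_eq_getElem _ _ hk]; exact h0
  · rintro ⟨hle, h0⟩
    have hk : (u - 1).toNat < cs.length := by omega
    refine ⟨(0 + ((u - 1).toNat : Int), cs[(u - 1).toNat]), ?_, ?_, by omega⟩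
    · rw [PySem.List.mem_enumerate_iff]; exact ⟨(u - 1).toNat, hk, rfl⟩
    · rwa [List.getD_eq_getElem _ _ hk] at h0

theorem mem_class2 (cs : List Char) (u : Int) (hu : 1 ≤ u) :
    u ∈ ((PySem.List.enumerate cs).foldl clsStep ([], [])).2 ↔
      (u ≤ (cs.length : Int) ∧ ¬cs.getD (u - 1).toNat ' ' = '0') := by
  rw [(mem_clsFold (PySem.List.enumerate cs) ([], []) u).2]
  simp only [List.not_mem_nil, false_or]
  constructor
  · rintro ⟨p, hp, h0, hup⟩
    rw [PySem.List.mem_enumerate_iff] at hp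
    obtain ⟨k, hk, rfl⟩ := hp
    simp only [zero_add] at hup h0 ⊢
    refine ⟨by omega, ?_⟩
    have hidx : (u - 1).toNat = k := by omega
    rw [hidx, List.getD_eq_getElem _ _ hk]; exact h0
  · rintro ⟨hle, h0⟩
    have hk : (u - 1).toNat < cs.length := by omega
    refine ⟨(0 + ((u - 1).toNat : Int), cs[(u - 1).toNat]), ?_, ?_, by omega⟩
    · rw [PySem.List.mem_enumerate_iff]; exact ⟨(u - 1).toNat, hk, rfl⟩
    · rwa [List.getD_eq_getElem _ _ hk] at h0

-- per-edge: A's class-list test equals the indexed-character test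
theorem cond_iff (cs : List Char) (u v : Int) (hu : 1 ≤ u) (hv : 1 ≤ v) :
    ((u ∈ ((PySem.List.enumerate cs).foldl clsStep ([], [])).1 ∧
      v ∈ ((PySem.List.enumerate cs).foldl clsStep ([], [])).2) ∨
     (u ∈ ((PySem.List.enumerate cs).foldl clsStep ([], [])).2 ∧
      v ∈ ((PySem.List.enumerate cs).foldl clsStep ([], [])).1)) ↔
    (u ≤ (cs.length : Int) ∧ v ≤ (cs.length : Int) ∧
     ((cs.getD (u - 1).toNat ' ' == '0') ≠ (cs.getD (v - 1).toNat ' ' == '0'))) := by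
  rw [mem_class1 cs u hu, mem_class1 cs v hv, mem_class2 cs u hu, mem_class2 cs v hv]
  by_cases h1 : cs.getD (u - 1).toNat ' ' = '0' <;>
    by_cases h2 : cs.getD (v - 1).toNat ' ' = '0' <;> simp [h1, h2] <;> tauto

theorem edges_eq :
    ([(1, [2, 5, 7]), (2, [3, 6, 1]), (3, [4, 7, 5]), (4, [5, 3]),
      (5, [1, 4, 3]), (6, [7, 2]), (7, [1, 3])] : List (Int × List Int)).foldl
      (fun acc nv =>
        nv.2.foldl (fun a2 nb => if nv.1 < nb then a2 ++ [(nv.1, nb)] else a2) acc) [] =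
    pvEdges := by decide

theorem classify_eq_aCut (s : String) : classify_nodes s = aCut s := by
  simp only [classify_nodes, aCut, edges_eq]
  have hA := PySem.List.foldl_count_if
    (fun e : Int × Int => decide
      ((e.1 ∈ ((PySem.List.enumerate s.toList).foldl clsStep ([], [])).1 ∧
        e.2 ∈ ((PySem.List.enumerate s.toList).foldl clsStep ([], [])).2) ∨
       (e.1 ∈ ((PySem.List.enumerate s.toList).foldl clsStep ([], [])).2 ∧
        e.2 ∈ ((PySem.List.enumerate s.toList).foldl clsStep ([], [])).1))) pvEdges 0
  have hB := PySem.List.sum_map_ite_one_zero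
    (fun e : Int × Int => decide
      (e.1 ≤ (s.toList.length : Int) ∧ e.2 ≤ (s.toList.length : Int) ∧
       ((s.toList.getD (e.1 - 1).toNat ' ' == '0') ≠ (s.toList.getD (e.2 - 1).toNat ' ' == '0'))))
    pvEdges
  simp only [decide_eq_true_eq] at hA hB
  rw [hA, hB, zero_add]
  congr 1
  apply List.countP_congr
  intro e he
  simp only [decide_eq_true_eq]
  simp only [pvEdges, List.mem_cons, List.not_mem_nil, or_false] at he
  rcases he with h | h | h | h | h | h | h | h | h | h <;> subst h <;>
    exact cond_iff s.toList _ _ (by norm_num) (by norm_num)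

-- selector for the seven classification bits (proof-only)
def bget (b0 b1 b2 b3 b4 b5 b6 : Bool) : Nat → Bool
  | 0 => b0 | 1 => b1 | 2 => b2 | 3 => b3 | 4 => b4 | 5 => b5 | _ => b6

-- A's edge sum as a function of (min n 7) and the seven bits
def aCoreF (m : Nat) (b0 b1 b2 b3 b4 b5 b6 : Bool) : Int :=
  (pvEdges.map (fun e =>
     if e.1.toNat ≤ m ∧ e.2.toNat ≤ m ∧
        (bget b0 b1 b2 b3 b4 b5 b6 (e.1.toNat - 1) ≠ bget b0 b1 b2 b3 b4 b5 b6 (e.2.toNat - 1))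
     then (1 : Int) else 0)).sum

-- B's bitmask computation as a function of (min n 7) and the seven bits
def bCoreF (m : Nat) (b0 b1 b2 b3 b4 b5 b6 : Bool) : Int :=
  let present := (1 <<< m) - 1
  let ones := (List.range m).foldl
    (fun acc i => if bget b0 b1 b2 b3 b4 b5 b6 i then acc ||| (1 <<< i) else acc) 0
  let zeros := present ^^^ ones
  let total := (List.range' 1 m).foldl (fun acc u =>
      let opp := if (ones >>> (u - 1)) &&& 1 == 0 then ones else zeros
      acc + popcount ((pvAdj.getD u 0) &&& present &&& opp)) 0
  ((total / 2 : Nat) : Int)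

theorem core_eq : ∀ (m : Fin 8) (b0 b1 b2 b3 b4 b5 b6 : Bool),
    aCoreF m.val b0 b1 b2 b3 b4 b5 b6 = bCoreF m.val b0 b1 b2 b3 b4 b5 b6 := by decide

theorem bne_cond_iff (x y : Char) :
    (((x == '0') : Bool) ≠ ((y == '0') : Bool)) ↔ (((x != '0') : Bool) ≠ ((y != '0') : Bool)) := by
  cases hx : x == '0' <;> cases hy : y == '0' <;> simp [bne, hx, hy]

theorem edge_term (cs : List Char) (b0 b1 b2 b3 b4 b5 b6 : Bool)
    (hb : ∀ i : Nat, i < 7 → bget b0 b1 b2 b3 b4 b5 b6 i = (cs.getD i ' ' != '0'))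
    (u v : Int) (hu : 1 ≤ u) (hu7 : u ≤ 7) (hv : 1 ≤ v) (hv7 : v ≤ 7) :
    (if u ≤ (cs.length : Int) ∧ v ≤ (cs.length : Int) ∧
        ((cs.getD (u - 1).toNat ' ' == '0') ≠ (cs.getD (v - 1).toNat ' ' == '0'))
     then (1 : Int) else 0)
    = (if u.toNat ≤ min cs.length 7 ∧ v.toNat ≤ min cs.length 7 ∧
        (bget b0 b1 b2 b3 b4 b5 b6 (u.toNat - 1) ≠ bget b0 b1 b2 b3 b4 b5 b6 (v.toNat - 1))
     then (1 : Int) else 0) := by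
  have h1 : (u ≤ (cs.length : Int)) ↔ u.toNat ≤ min cs.length 7 := by omega
  have h2 : (v ≤ (cs.length : Int)) ↔ v.toNat ≤ min cs.length 7 := by omega
  have hidx : (u - 1).toNat = u.toNat - 1 := by omega
  have hidy : (v - 1).toNat = v.toNat - 1 := by omega
  rw [hidx, hidy, hb (u.toNat - 1) (by omega), hb (v.toNat - 1) (by omega)]
  simp only [h1, h2, bne_cond_iff]

theorem aCut_eq_core (s : String) :
    aCut s = aCoreF (min s.toList.length 7)
      (s.toList.getD 0 ' ' != '0') (s.toList.getD 1 ' ' != '0') (s.toList.getD 2 ' ' != '0')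
      (s.toList.getD 3 ' ' != '0') (s.toList.getD 4 ' ' != '0') (s.toList.getD 5 ' ' != '0')
      (s.toList.getD 6 ' ' != '0') := by
  simp only [aCut, aCoreF]
  have hb : ∀ i : Nat, i < 7 →
      bget (s.toList.getD 0 ' ' != '0') (s.toList.getD 1 ' ' != '0') (s.toList.getD 2 ' ' != '0')
        (s.toList.getD 3 ' ' != '0') (s.toList.getD 4 ' ' != '0') (s.toList.getD 5 ' ' != '0')
        (s.toList.getD 6 ' ' != '0') i = (s.toList.getD i ' ' != '0') := by
    intro i hi; interval_cases i <;> rfl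
  congr 1
  apply List.map_congr_left
  intro e he
  simp only [pvEdges, List.mem_cons, List.not_mem_nil, or_false] at he
  rcases he with h | h | h | h | h | h | h | h | h | h <;> subst h <;>
    exact edge_term s.toList _ _ _ _ _ _ _ hb _ _
      (by norm_num) (by norm_num) (by norm_num) (by norm_num)

theorem ones_eq (cs : List Char) :
    (List.range (min cs.length 7)).foldl
      (fun acc i => if cs.getD i ' ' != '0' then acc ||| (1 <<< i) else acc) 0 =
    (List.range (min cs.length 7)).foldl
      (fun acc i => if bget (cs.getD 0 ' ' != '0') (cs.getD 1 ' ' != '0') (cs.getD 2 ' ' != '0')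
          (cs.getD 3 ' ' != '0') (cs.getD 4 ' ' != '0') (cs.getD 5 ' ' != '0')
          (cs.getD 6 ' ' != '0') i then acc ||| (1 <<< i) else acc) 0 := by
  apply PySem.List.foldl_congr_mem
  intro acc i hi
  rw [List.mem_range] at hi
  have h7 : i < 7 := lt_of_lt_of_le hi (min_le_right _ _)
  interval_cases i <;> rfl

theorem bCut_eq_core (s : String) :
    pvCutB s = bCoreF (min s.toList.length 7)
      (s.toList.getD 0 ' ' != '0') (s.toList.getD 1 ' ' != '0') (s.toList.getD 2 ' ' != '0')
      (s.toList.getD 3 ' ' != '0') (s.toList.getD 4 ' ' != '0') (s.toList.getD 5 ' ' != '0')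
      (s.toList.getD 6 ' ' != '0') := by
  simp only [pvCutB, bCoreF]
  rw [ones_eq]

theorem cut_eq (s : String) : classify_nodes s = pvCutB s := by
  rw [classify_eq_aCut, aCut_eq_core, bCut_eq_core]
  exact core_eq ⟨min s.toList.length 7, by omega⟩ _ _ _ _ _ _ _

-- ===== outer loop: A's first-minimum fold = min? over the keys =====

def selStep {α : Type} (k : α → Int) (a : Option α) (x : α) : Option α :=
  match a with
  | none => some x
  | some m => if k x < k m then some x else some m

def stepA (f : String → Int) (st : Option Int × Option String) (kv : String × String) :
    Option Int × Option String :=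
  match st.1 with
  | none => (some (f kv.2), some kv.1)
  | some lv => if f kv.2 < lv then (some (f kv.2), some kv.1) else st

theorem min?_eq_foldl_selStep {α : Type} (l : List α) (k : α → Int) :
    PySem.List.min? l k = l.foldl (selStep k) none := rfl

theorem fold_aux (f : String → Int) (l : List (String × String)) (kv0 : String × String) :
    l.foldl (stepA f) (some (f kv0.2), some kv0.1) =
    (match l.foldl (selStep (fun kv : String × String => f kv.2)) (some kv0) with
     | some kv => (some (f kv.2), some kv.1)
     | none => (none, none)) := by
  induction l generalizing kv0 with
  | nil => rfl
  | cons hd t ih =>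
    simp only [List.foldl_cons]
    have hs : selStep (fun kv : String × String => f kv.2) (some kv0) hd
        = if f hd.2 < f kv0.2 then some hd else some kv0 := rfl
    have ha : stepA f (some (f kv0.2), some kv0.1) hd
        = if f hd.2 < f kv0.2 then (some (f hd.2), some hd.1)
          else (some (f kv0.2), some kv0.1) := rfl
    rw [hs, ha]
    by_cases h : f hd.2 < f kv0.2
    · rw [if_pos h, if_pos h]; exact ih hd
    · rw [if_neg h, if_neg h]; exact ih kv0

theorem fold_eq_min? (f : String → Int) (l : List (String × String)) :
    (l.foldl (stepA f) (none, none)).2 =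
    (PySem.List.min? l (fun kv => f kv.2)).map Prod.fst := by
  cases l with
  | nil => rfl
  | cons hd t =>
    have h1 : (hd :: t).foldl (stepA f) (none, none)
        = t.foldl (stepA f) (some (f hd.2), some hd.1) := rfl
    have h0 : PySem.List.min? (hd :: t) (fun kv => f kv.2)
        = t.foldl (selStep (fun kv : String × String => f kv.2)) (some hd) := rfl
    rw [h1, fold_aux, h0]
    cases t.foldl (selStep (fun kv : String × String => f kv.2)) (some hd) <;> rfl

theorem min?_map_fst_aux (g : String → Int) (l : List (String × String))
    (acc : Option (String × String)) :
    l.foldl (fun a kv => selStep g a kv.1) (acc.map Prod.fst) =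
    (l.foldl (selStep (fun kv : String × String => g kv.1)) acc).map Prod.fst := by
  induction l generalizing acc with
  | nil => rfl
  | cons hd t ih =>
    simp only [List.foldl_cons]
    cases acc with
    | none => exact ih (some hd)
    | some m =>
      have hL : selStep g ((some m).map Prod.fst) hd.1
          = if g hd.1 < g m.1 then some hd.1 else some m.1 := rfl
      have hR : selStep (fun kv : String × String => g kv.1) (some m) hd
          = if g hd.1 < g m.1 then some hd else some m := rfl
      show t.foldl _ (selStep g ((some m).map Prod.fst) hd.1) = _
      rw [hL, hR]
      by_cases h : g hd.1 < g m.1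
      · rw [if_pos h, if_pos h]; exact ih (some hd)
      · rw [if_neg h, if_neg h]; exact ih (some m)

theorem min?_map_fst (g : String → Int) (l : List (String × String)) :
    PySem.List.min? (l.map Prod.fst) g =
    (PySem.List.min? l (fun kv => g kv.1)).map Prod.fst := by
  rw [min?_eq_foldl_selStep, min?_eq_foldl_selStep, List.foldl_map]
  exact min?_map_fst_aux g l none

theorem min?_congr_aux {α : Type} (k1 k2 : α → Int) (l : List α)
    (acc : Option α) (hacc : ∀ m, acc = some m → k1 m = k2 m)
    (h : ∀ x ∈ l, k1 x = k2 x) :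
    l.foldl (selStep k1) acc = l.foldl (selStep k2) acc := by
  induction l generalizing acc with
  | nil => rfl
  | cons hd t ih =>
    simp only [List.foldl_cons]
    have hhd : k1 hd = k2 hd := h hd (List.mem_cons_self ..)
    have ht : ∀ x ∈ t, k1 x = k2 x := fun x hx => h x (List.mem_cons_of_mem _ hx)
    cases acc with
    | none => exact ih (some hd) (by intro m hm; cases hm; exact hhd) ht
    | some m =>
      have hm : k1 m = k2 m := hacc m rfl
      have hL : selStep k1 (some m) hd = if k1 hd < k1 m then some hd else some m := rfl
      have hR : selStep k2 (some m) hd = if k2 hd < k2 m then some hd else some m := rfl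
      rw [hL, hR, hhd, hm]
      by_cases hc : k2 hd < k2 m
      · simp only [if_pos hc]
        exact ih (some hd) (by intro m' hm'; cases hm'; exact hhd) ht
      · simp only [if_neg hc]
        exact ih (some m) (by intro m' hm'; cases hm'; exact hm) ht

theorem min?_congr_mem {α : Type} (k1 k2 : α → Int) (l : List α)
    (h : ∀ x ∈ l, k1 x = k2 x) :
    PySem.List.min? l k1 = PySem.List.min? l k2 := by
  rw [min?_eq_foldl_selStep, min?_eq_foldl_selStep]
  exact min?_congr_aux k1 k2 l none (by intro m hm; cases hm) h

theorem get?_of_nodup (l : List (String × String)) (h : (l.map Prod.fst).Nodup)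
    (kv : String × String) (hkv : kv ∈ l) :
    (PySem.Dict.mk l).get? kv.1 = some kv.2 := by
  induction l with
  | nil => cases hkv
  | cons hd t ih =>
    simp only [List.map_cons, List.nodup_cons] at h
    rcases List.mem_cons.mp hkv with rfl | hkv'
    · simp [PySem.Dict.get?, PySem.Dict.items, List.find?]
    · have hne : hd.1 ≠ kv.1 := by
        intro he
        exact h.1 (he ▸ List.mem_map.mpr ⟨kv, hkv', rfl⟩)
      have := ih h.2 hkv'
      simp only [PySem.Dict.get?, PySem.Dict.items, List.find?_cons] at this ⊢
      have hb : (hd.1 == kv.1) = false := by simp [hne]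
      rw [hb]
      exact this

-- ===== VERDICT (by name: the statement is the Claim_ definition above) =====
theorem replace_lowest_value_with_graph_spec : Claim_equal_replace_lowest_value_with_graph := by
  intro input_string graph_dict _ hpre
  unfold Spec_replace_lowest_value_with_graph
  simp only [replace_lowest_value_with_graph, replace_lowest_value_with_graph_alt]
  have hA : graph_dict.foldl (fun (st : Option Int × Option String) kv =>
      let result := classify_nodes kv.2
      match st.1 with
      | none => (some result, some kv.1)
      | some lv => if result < lv then (some result, some kv.1) else st) (none, none) =
    graph_dict.foldl (stepA pvCutB) (none, none) := by
    apply PySem.List.foldl_congr_mem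
    intro acc kv _
    rcases acc with ⟨o, k0⟩
    cases o <;> simp [stepA, cut_eq]
  have hkeys : (PySem.Dict.mk graph_dict).keys = graph_dict.map Prod.fst := rfl
  have hB : PySem.List.min? (PySem.Dict.mk graph_dict).keys
      (fun k => pvCutB (((PySem.Dict.mk graph_dict).get? k).getD "")) =
      (PySem.List.min? graph_dict (fun kv => pvCutB kv.2)).map Prod.fst := by
    rw [hkeys, min?_map_fst]
    congr 1
    apply min?_congr_mem
    intro kv hkv
    rw [get?_of_nodup graph_dict hpre.2 kv hkv]
    rfl
  rw [hA, fold_eq_min?, hB]
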